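-- pv_equiv track=rewrite | github.com/pypi-data/pypi-mirror-399 | packages/toycrypto/toycrypto-0.6.1.tar.gz/toycrypto-0.6.1/src/toy_crypto/bit_utils.py | bit_index_linear
-- ===== SOURCE A (Python) =====
-- def bit_index_linear(n: int, k: int, b: bool | int = 1) -> int | None:
--     """Returns which bit is the k-th b bit in n.
--
--     This is to mimic bitarray.utils.count_n, but for working with python
--     built-in int
--     """
--
--     if k < 1:
--         raise ValueError("n must be positive")
--
--     bc = n.bit_count() if b else (~n).bit_count()
--
--     if k > bc:
--         return None
--     b = 1 if b else 0
--
--     # naive code that just does a linear search count through bits of n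
--     count = 0
--     for i in range(n.bit_length()):
--         n, r = divmod(n, 2)
--         if r == b:
--             count += 1
--             if count >= k:
--                 return i
--     return None  # This really shouldn't ever be reached.
-- ===== SOURCE B (Python) =====
-- def bit_index_linear(n: int, k: int, b: bool | int = 1) -> int | None:
--     """Returns which bit is the k-th b bit in n (k-th matching bit via
--     lowest-set-bit popping over a mask, instead of a positional scan)."""
--     if k < 1:
--         raise ValueError("n must be positive")
--
--     bc = n.bit_count() if b else (~n).bit_count()
--     if k > bc:
--         return None
--
--     x = (n if b else ~n) & ((1 << n.bit_length()) - 1)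
--     for _ in range(k - 1):
--         x &= x - 1
--     if x == 0:
--         return None
--     return (x & -x).bit_length() - 1
-- ===== Notes on version B (the rewrite author's own statement) =====
-- stated objective: alternative
-- what changed: Replaces A's positional divmod scan over every bit position with masking the matching bits once ((n if b else ~n) & ((1<<bit_length)-1)) and then popping k-1 lowest set bits via x &= x-1, reading the answer off the lowest set bit's bit_length.
import Mathlib
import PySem

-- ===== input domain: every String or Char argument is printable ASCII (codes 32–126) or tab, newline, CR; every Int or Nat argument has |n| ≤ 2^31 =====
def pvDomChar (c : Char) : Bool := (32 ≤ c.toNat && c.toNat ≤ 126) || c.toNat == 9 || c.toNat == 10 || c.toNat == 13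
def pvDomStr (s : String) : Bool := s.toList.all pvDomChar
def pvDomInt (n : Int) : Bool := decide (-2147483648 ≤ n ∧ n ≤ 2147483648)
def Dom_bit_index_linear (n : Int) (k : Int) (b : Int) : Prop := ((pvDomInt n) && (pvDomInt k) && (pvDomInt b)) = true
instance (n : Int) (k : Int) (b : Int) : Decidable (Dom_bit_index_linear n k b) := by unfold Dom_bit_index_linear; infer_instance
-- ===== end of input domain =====

-- B finds the k-th matching bit by masking and popping lowest set bits instead of A's positional divmod scan; objective: alternative (different traversal, similar cost).

-- ===== PORT A =====
-- the for-loop over range(n.bit_length()) with early return, state (n, count), index i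
def pvALoop (k bint : Int) : Int → Int → Nat → Nat → Option Int
  | _, _, _, 0 => none
  | n, count, i, f + 1 =>
    let q := PySem.Int.floordiv n 2
    let r := PySem.Int.mod n 2
    if r = bint then
      if count + 1 ≥ k then some (i : Int)
      else pvALoop k bint q (count + 1) (i + 1) f
    else pvALoop k bint q count (i + 1) f

def bit_index_linear (n : Int) (k : Int) (b : Int) : Option Int :=
  -- the 'if k < 1: raise ValueError' branch is excluded by Pre_bit_index_linear
  let bc : Int := if b ≠ 0 then (PySem.Int.bitCount n : Int) else (PySem.Int.bitCount (Int.not n) : Int)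
  if k > bc then none
  else
    let bint : Int := if b ≠ 0 then 1 else 0
    pvALoop k bint n 0 0 (PySem.Int.bitLength n)

-- ===== PORT B =====
-- 'for _ in range(k-1): x &= x - 1'
def pvClearLoop (x : Int) : Nat → Int
  | 0 => x
  | j + 1 => pvClearLoop (PySem.Int.band x (x - 1)) j

def bit_index_linear_alt (n : Int) (k : Int) (b : Int) : Option Int :=
  -- the 'if k < 1: raise ValueError' branch is excluded by Pre_bit_index_linear
  let bc : Int := if b ≠ 0 then (PySem.Int.bitCount n : Int) else (PySem.Int.bitCount (Int.not n) : Int)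
  if k > bc then none
  else
    -- (n if b else ~n) & ((1 << n.bit_length()) - 1)
    let x0 : Int := PySem.Int.band (if b ≠ 0 then n else Int.not n) (((1 : Int) <<< PySem.Int.bitLength n) - 1)
    let x : Int := pvClearLoop x0 (k - 1).toNat
    if x = 0 then none
    else some ((PySem.Int.bitLength (PySem.Int.band x (-x)) : Int) - 1)

-- ===== PRECONDITION & SPEC =====
-- Pre_ excludes exactly k < 1, where the Python A raises ValueError.
def Pre_bit_index_linear (n : Int) (k : Int) (b : Int) : Prop := 1 ≤ k
instance (n : Int) (k : Int) (b : Int) : Decidable (Pre_bit_index_linear n k b) := by unfold Pre_bit_index_linear; infer_instance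
def pvWitness_bit_index_linear : Int × Int × Int := (52, 2, 1)

def Spec_bit_index_linear (n : Int) (k : Int) (b : Int) (out : Option Int) : Prop := out = bit_index_linear_alt n k b
instance (n : Int) (k : Int) (b : Int) (out : Option Int) : Decidable (Spec_bit_index_linear n k b out) := by unfold Spec_bit_index_linear; infer_instance

-- ===== CLAIM (what is proved, stated in full; the proofs are below) =====
def Claim_equal_bit_index_linear : Prop := ∀ (n : Int) (k : Int) (b : Int), Dom_bit_index_linear n k b → Pre_bit_index_linear n k b → Spec_bit_index_linear n k b (bit_index_linear n k b)

-- ===== LEMMAS AND PROOFS =====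

-- middle spec: index of the (j+1)-th set bit of a natural number, scanning from bit 0
def kthBit (m j : Nat) : Option Nat :=
  if h : m = 0 then none
  else if m % 2 = 1 then
    (if j = 0 then some 0 else (kthBit (m / 2) (j - 1)).map (· + 1))
  else (kthBit (m / 2) j).map (· + 1)
  termination_by m
  decreasing_by all_goals exact Nat.div_lt_self (Nat.pos_of_ne_zero h) one_lt_two

-- the mask of bits of n (scanned by floor-divmod) that match bint, over f positions
def pvMask (bint : Int) : Int → Nat → Nat
  | _, 0 => 0
  | n, f + 1 =>
    (if PySem.Int.mod n 2 = bint then 1 else 0) + 2 * pvMask bint (PySem.Int.floordiv n 2) f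

theorem kthBit_zero (j : Nat) : kthBit 0 j = none := by rw [kthBit]; simp

theorem kthBit_even (t j : Nat) : kthBit (2 * t) j = (kthBit t j).map (· + 1) := by
  rcases Nat.eq_zero_or_pos t with rfl | ht
  · simp [kthBit_zero]
  · rw [kthBit]
    have h1 : ¬ (2 * t = 0) := by omega
    have h3 : 2 * t / 2 = t := by omega
    simp [h1, h3]

theorem kthBit_odd_zero (t : Nat) : kthBit (2 * t + 1) 0 = some 0 := by
  rw [kthBit]
  have h2 : (2 * t + 1) % 2 = 1 := by omega
  simp [h2]

theorem kthBit_odd_succ (t j : Nat) : kthBit (2 * t + 1) (j + 1) = (kthBit t j).map (· + 1) := by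
  rw [kthBit]
  have h2 : (2 * t + 1) % 2 = 1 := by omega
  have h3 : (2 * t + 1) / 2 = t := by omega
  simp [h2, h3]

-- ===== A-side: the scan computes kthBit of the match mask =====
theorem aLoop_eq (k bint : Int) :
    ∀ (f : Nat) (n count : Int) (i : Nat), count < k →
      pvALoop k bint n count i f
        = (kthBit (pvMask bint n f) (k - count - 1).toNat).map (fun j => ((i + j : Nat) : Int)) := by
  intro f
  induction f with
  | zero => intro n count i h; simp [pvALoop, pvMask, kthBit_zero]
  | succ f ih =>
    intro n count i h
    rw [pvALoop, pvMask]
    by_cases hr : PySem.Int.mod n 2 = bint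
    · simp only [hr, if_true]
      by_cases hk : count + 1 ≥ k
      · have ht : (k - count - 1).toNat = 0 := by omega
        rw [if_pos hk, ht]
        rw [show (1 + 2 * pvMask bint (PySem.Int.floordiv n 2) f) = 2 * pvMask bint (PySem.Int.floordiv n 2) f + 1 by omega]
        rw [kthBit_odd_zero]
        simp
      · rw [if_neg hk]
        have ht : (k - count - 1).toNat = (k - (count + 1) - 1).toNat + 1 := by omega
        rw [show (1 + 2 * pvMask bint (PySem.Int.floordiv n 2) f) = 2 * pvMask bint (PySem.Int.floordiv n 2) f + 1 by omega]
        rw [ht, kthBit_odd_succ, ih _ _ _ (by omega)]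
        rw [Option.map_map]
        apply Option.map_congr
        intro a _
        simp
        omega
    · simp only [hr, if_false, zero_add]
      rw [kthBit_even, ih _ _ _ h, Option.map_map]
      apply Option.map_congr
      intro a _
      simp
      omega

-- ===== B-side: modular arithmetic facts =====
theorem emod_two_mul_split (P y : Int) (hP : 0 < P) :
    y % (2 * P) = y % 2 + 2 * ((y / 2) % P) := by
  have h1 : y = 2 * (y / 2) + y % 2 := by omega
  have h2 : y / 2 = P * (y / 2 / P) + (y / 2) % P := (Int.ediv_add_emod (y/2) P).symm
  have hb1 : 0 ≤ y % 2 ∧ y % 2 < 2 := ⟨Int.emod_nonneg y (by norm_num), Int.emod_lt_of_pos y (by norm_num)⟩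
  have hb2 : 0 ≤ (y / 2) % P ∧ (y / 2) % P < P := ⟨Int.emod_nonneg _ (by omega), Int.emod_lt_of_pos _ hP⟩
  have key : y = (y % 2 + 2 * ((y / 2) % P)) + (2 * P) * (y / 2 / P) := by
    linear_combination h1 + 2 * h2
  conv_lhs => rw [key]
  rw [Int.add_mul_emod_self_left, Int.emod_eq_of_lt (by omega) (by omega)]

theorem emod_neg_succ (P w : Int) (hP : 0 < P) (hw : 0 ≤ w) :
    (-w - 1) % P = P - 1 - w % P := by
  have h2 : w = P * (w / P) + w % P := (Int.ediv_add_emod w P).symm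
  have hb : 0 ≤ w % P ∧ w % P < P := ⟨Int.emod_nonneg _ (by omega), Int.emod_lt_of_pos _ hP⟩
  have key : -w - 1 = (P - 1 - w % P) + P * (-(w / P) - 1) := by linear_combination -h2
  conv_lhs => rw [key]
  rw [Int.add_mul_emod_self_left, Int.emod_eq_of_lt (by omega) (by omega)]

theorem not_eq (y : Int) : Int.not y = -y - 1 := by
  cases y with
  | ofNat n => show Int.negSucc n = _ ; simp [Int.negSucc_eq] ; ring
  | negSucc n => show (n : Int) = _ ; simp [Int.negSucc_eq]

theorem one_le_two_pow_int (f : Nat) : (1:Int) ≤ 2 ^ f := by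
  rw [show ((2:Int) ^ f) = ((2 ^ f : Nat) : Int) by push_cast; ring]
  exact_mod_cast Nat.one_le_two_pow

theorem pvMask_one_eq (f : Nat) : ∀ y : Int, (pvMask 1 y f : Int) = y % (2 ^ f) := by
  induction f with
  | zero => intro y; simp [pvMask, Int.emod_one]
  | succ f ih =>
    intro y
    rw [pvMask]
    rw [PySem.Int.mod_eq_emod_of_pos (by norm_num), PySem.Int.floordiv_eq_ediv_of_pos (by norm_num)]
    have hsplit := emod_two_mul_split (2 ^ f) y (by positivity)
    rw [show (2:Int) ^ (f+1) = 2 * 2 ^ f by ring]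
    rw [hsplit]
    push_cast
    rw [ih]
    have hb : 0 ≤ y % 2 ∧ y % 2 < 2 := ⟨Int.emod_nonneg y (by norm_num), Int.emod_lt_of_pos y (by norm_num)⟩
    by_cases h : y % 2 = 1
    · simp [h]
    · have : y % 2 = 0 := by omega
      simp [h, this]

theorem pvMask_zero_eq (f : Nat) : ∀ y : Int, pvMask 0 y f = pvMask 1 (Int.not y) f := by
  induction f with
  | zero => intro y; simp [pvMask]
  | succ f ih =>
    intro y
    rw [pvMask, pvMask]
    rw [not_eq]
    rw [PySem.Int.mod_eq_emod_of_pos (by norm_num), PySem.Int.mod_eq_emod_of_pos (by norm_num),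
        PySem.Int.floordiv_eq_ediv_of_pos (by norm_num), PySem.Int.floordiv_eq_ediv_of_pos (by norm_num)]
    have h1 : (-y - 1) % 2 = 1 - y % 2 := by omega
    have h2 : (-y - 1) / 2 = -(y / 2) - 1 := by omega
    rw [h1, h2]
    have := ih (y / 2)
    rw [not_eq] at this
    rw [this]
    have hb : 0 ≤ y % 2 ∧ y % 2 < 2 := ⟨Int.emod_nonneg y (by norm_num), Int.emod_lt_of_pos y (by norm_num)⟩
    by_cases h : y % 2 = 0
    · simp [h]
    · have h3 : y % 2 = 1 := by omega
      simp [h3]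

theorem band_mask (y : Int) (f : Nat) : PySem.Int.band y ((2 : Int) ^ f - 1) = y % (2 ^ f) := by
  have hm : ((2:Int) ^ f - 1) = (((2 ^ f - 1 : Nat) : Int)) := by
    have : (1:Nat) ≤ 2 ^ f := Nat.one_le_two_pow
    push_cast [this]
    ring
  by_cases hy : 0 ≤ y
  · rw [show y = ((y.toNat : Nat) : Int) from (Int.toNat_of_nonneg hy).symm, hm,
        PySem.Int.band_natCast, Nat.and_two_pow_sub_one_eq_mod]
    push_cast
    rfl
  · have hneg : y < 0 := by omega
    rw [PySem.Int.band]
    rw [if_neg (by omega), if_pos (by have := one_le_two_pow_int f; omega)]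
    have hw : 0 ≤ -y - 1 := by omega
    have hwn : (-y - 1) = (((-y-1).toNat : Nat) : Int) := (Int.toNat_of_nonneg hw).symm
    have htn : ((2:Int) ^ f - 1).toNat = 2 ^ f - 1 := by
      have := one_le_two_pow_int f
      have h2 : ((2:Int) ^ f).toNat = 2 ^ f := by
        rw [show ((2:Int) ^ f) = (((2 ^ f : Nat) : Int)) by push_cast; ring]
        exact Int.toNat_natCast _
      omega
    rw [htn, Nat.land_comm, Nat.and_two_pow_sub_one_eq_mod]
    have hmod := emod_neg_succ (2 ^ f) (-y - 1) (by have := one_le_two_pow_int f; omega) hw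
    rw [show y = -(-y-1) - 1 by ring, hmod]
    have hlt : (-y-1).toNat % 2 ^ f < 2 ^ f := Nat.mod_lt _ (Nat.pos_of_ne_zero (by positivity))
    have hcast : ((-y - 1) % 2 ^ f) = (((-y-1).toNat % 2 ^ f : Nat) : Int) := by
      conv_lhs => rw [hwn]
      push_cast
      ring
    rw [hcast]
    have h1 : (1:Nat) ≤ 2 ^ f := Nat.one_le_two_pow
    rw [Nat.sub_sub, Nat.cast_sub (by omega)]
    push_cast
    ring

-- ===== B-side: Nat bit-clearing helpers characterising x & (x-1) and x & -x =====
def clearL (m : Nat) : Nat :=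
  if h : m = 0 then 0
  else if m % 2 = 1 then m - 1 else 2 * clearL (m / 2)
  termination_by m
  decreasing_by exact Nat.div_lt_self (Nat.pos_of_ne_zero h) one_lt_two

def lowB (m : Nat) : Nat :=
  if h : m = 0 then 0
  else if m % 2 = 1 then 1 else 2 * lowB (m / 2)
  termination_by m
  decreasing_by exact Nat.div_lt_self (Nat.pos_of_ne_zero h) one_lt_two

theorem land_mod_two (a b : Nat) : (a &&& b) % 2 = a % 2 * (b % 2) := by
  have h := Nat.testBit_and a b 0
  simp only [Nat.testBit_zero] at h
  have h2 : ((a &&& b) % 2 = 1) = ((a % 2 = 1) ∧ (b % 2 = 1)) := by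
    simpa [Bool.and_eq_true, decide_eq_true_iff] using congrArg (· = true) h
  rw [eq_iff_iff] at h2
  rcases Nat.mod_two_eq_zero_or_one a with ha | ha <;>
    rcases Nat.mod_two_eq_zero_or_one b with hb | hb <;>
      rcases Nat.mod_two_eq_zero_or_one (a &&& b) with hc | hc <;>
        simp [ha, hb, hc] at h2 ⊢

theorem land_pred (m : Nat) : m &&& (m - 1) = clearL m := by
  induction m using Nat.strong_induction_on with
  | _ m ih =>
    rw [clearL]
    rcases Nat.eq_zero_or_pos m with rfl | hm
    · simp
    · rw [dif_neg (by omega)]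
      have hx : m &&& (m-1) = 2 * ((m &&& (m-1)) / 2) + (m &&& (m-1)) % 2 := by omega
      rw [hx, Nat.and_div_two, land_mod_two]
      by_cases h : m % 2 = 1
      · rw [if_pos h]
        have h1 : (m - 1) / 2 = m / 2 := by omega
        have h2 : (m - 1) % 2 = 0 := by omega
        rw [h1, h2, Nat.and_self]
        omega
      · rw [if_neg h]
        have h1 : (m - 1) / 2 = m / 2 - 1 := by omega
        have h2 : m % 2 = 0 := by omega
        rw [h1, h2, ih (m / 2) (by omega)]
        omega

theorem clearL_le (m : Nat) : clearL m ≤ m := by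
  induction m using Nat.strong_induction_on with
  | _ m ih =>
    rw [clearL]
    rcases Nat.eq_zero_or_pos m with rfl | hm
    · simp
    · rw [dif_neg (by omega)]
      by_cases h : m % 2 = 1
      · rw [if_pos h]; omega
      · rw [if_neg h]; have := ih (m / 2) (by omega); omega

theorem sub_clearL (m : Nat) : m - clearL m = lowB m := by
  induction m using Nat.strong_induction_on with
  | _ m ih =>
    rw [clearL, lowB]
    rcases Nat.eq_zero_or_pos m with rfl | hm
    · simp
    · rw [dif_neg (by omega), dif_neg (by omega)]
      by_cases h : m % 2 = 1
      · rw [if_pos h, if_pos h]; omega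
      · rw [if_neg h, if_neg h]
        have h1 := ih (m / 2) (by omega)
        have h2 := clearL_le (m / 2)
        omega

theorem lowB_ne_zero (m : Nat) (h : m ≠ 0) : lowB m ≠ 0 := by
  induction m using Nat.strong_induction_on with
  | _ m ih =>
    rw [lowB, dif_neg h]
    by_cases h2 : m % 2 = 1
    · rw [if_pos h2]; omega
    · rw [if_neg h2]
      have := ih (m / 2) (by omega) (by omega)
      omega

theorem band_pred_nat (m : Nat) : PySem.Int.band (m : Int) ((m : Int) - 1) = ((clearL m : Nat) : Int) := by
  rcases Nat.eq_zero_or_pos m with rfl | hm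
  · show PySem.Int.band 0 (-1) = _
    rw [PySem.Int.band_neg_one]
    simp [clearL]
  · rw [show ((m:Int) - 1) = (((m - 1 : Nat) : Int)) by push_cast [hm]; ring,
        PySem.Int.band_natCast, land_pred]

theorem band_neg_nat (m : Nat) : PySem.Int.band (m : Int) (-(m : Int)) = ((lowB m : Nat) : Int) := by
  rcases Nat.eq_zero_or_pos m with rfl | hm
  · show PySem.Int.band 0 0 = _
    simp [lowB]
  · rw [PySem.Int.band, if_pos (by positivity), if_neg (by omega)]
    have h1 : (-(-(m:Int)) - 1).toNat = m - 1 := by omega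
    have h2 : ((m:Int)).toNat = m := by omega
    rw [h1, h2, land_pred, ← sub_clearL]

theorem bitLength_pos (t : Nat) (h : t ≠ 0) : 1 ≤ PySem.Int.bitLength (t : Int) := by
  rw [PySem.Int.bitLength_natCast (Nat.pos_of_ne_zero h)]
  omega

theorem lowB_odd (t : Nat) : lowB (2 * t + 1) = 1 := by
  rw [lowB, dif_neg (by omega), if_pos (by omega)]

theorem lowB_even (t : Nat) (ht : t ≠ 0) : lowB (2 * t) = 2 * lowB t := by
  rw [lowB, dif_neg (by omega), if_neg (by omega), show 2 * t / 2 = t by omega]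

theorem kth0 (m : Nat) (h : m ≠ 0) :
    kthBit m 0 = some (PySem.Int.bitLength ((lowB m : Nat) : Int) - 1) := by
  induction m using Nat.strong_induction_on with
  | _ m ih =>
    by_cases hodd : m % 2 = 1
    · obtain ⟨t, rfl⟩ : ∃ t, m = 2 * t + 1 := ⟨m / 2, by omega⟩
      rw [kthBit_odd_zero, lowB_odd]
      simp only [Nat.cast_one]
      rw [show PySem.Int.bitLength (1 : Int) = 1 from by decide]
    · obtain ⟨t, rfl⟩ : ∃ t, m = 2 * t := ⟨m / 2, by omega⟩
      have ht : t ≠ 0 := by omega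
      rw [kthBit_even, ih t (by omega) ht, lowB_even t ht]
      have hlz := lowB_ne_zero t ht
      have hbl : PySem.Int.bitLength ((2 * lowB t : Nat) : Int)
          = PySem.Int.bitLength ((lowB t : Nat) : Int) + 1 := by
        rw [PySem.Int.bitLength_natCast (by omega), show 2 * lowB t / 2 = lowB t by omega]
      rw [hbl]
      simp only [Option.map_some]
      congr 1
      have hp := bitLength_pos (lowB t) hlz
      omega

theorem kth_succ (m j : Nat) : kthBit m (j + 1) = kthBit (clearL m) j := by
  induction m using Nat.strong_induction_on with
  | _ m ih =>
    rcases Nat.eq_zero_or_pos m with rfl | hm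
    · rw [show clearL 0 = 0 by rw [clearL]; simp, kthBit_zero, kthBit_zero]
    · by_cases hodd : m % 2 = 1
      · rw [show m = 2 * (m / 2) + 1 by omega, kthBit_odd_succ]
        rw [clearL, dif_neg (by omega), if_pos (by omega)]
        rw [show 2 * (m / 2) + 1 - 1 = 2 * (m / 2) by omega, kthBit_even]
      · rw [clearL, dif_neg (by omega), if_neg hodd]
        rw [show m = 2 * (m / 2) by omega, kthBit_even, show 2 * (m / 2) / 2 = m / 2 by omega]
        rw [ih (m / 2) (by omega), ← kthBit_even]

theorem bTail (j : Nat) : ∀ m : Nat,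
    (if pvClearLoop (m : Int) j = 0 then none
     else some ((PySem.Int.bitLength (PySem.Int.band (pvClearLoop (m : Int) j) (-(pvClearLoop (m : Int) j))) : Int) - 1))
      = (kthBit m j).map (Nat.cast : Nat → Int) := by
  induction j with
  | zero =>
    intro m
    show (if (m : Int) = 0 then none else _) = _
    by_cases hm : m = 0
    · subst hm; simp [kthBit_zero]
    · rw [if_neg (by exact_mod_cast hm)]
      show some ((PySem.Int.bitLength (PySem.Int.band (m : Int) (-(m : Int))) : Int) - 1) = _
      rw [band_neg_nat, kth0 m hm]
      simp only [Option.map_some]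
      have hp := bitLength_pos (lowB m) (lowB_ne_zero m hm)
      congr 1
      push_cast [hp]
      omega
  | succ j ih =>
    intro m
    have hstep : pvClearLoop (m : Int) (j + 1) = pvClearLoop ((clearL m : Nat) : Int) j := by
      show pvClearLoop (PySem.Int.band (m : Int) ((m : Int) - 1)) j = _
      rw [band_pred_nat]
    rw [hstep, ih (clearL m), kth_succ]

-- ===== assembly =====
theorem main_eq (n k b : Int) (hk : 1 ≤ k) : bit_index_linear n k b = bit_index_linear_alt n k b := by
  rw [bit_index_linear, bit_index_linear_alt]
  by_cases hbc : k > (if b ≠ 0 then (PySem.Int.bitCount n : Int) else (PySem.Int.bitCount (Int.not n) : Int))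
  · rw [if_pos hbc, if_pos hbc]
  · rw [if_neg hbc, if_neg hbc]
    set L := PySem.Int.bitLength n with hL
    set bint : Int := if b ≠ 0 then 1 else 0 with hbint
    set y : Int := if b ≠ 0 then n else Int.not n with hy
    -- the B-side mask is the A-side match mask
    have hmask : PySem.Int.band y (((1 : Int) <<< L) - 1) = ((pvMask bint n L : Nat) : Int) := by
      rw [show ((1 : Int) <<< L) = 2 ^ L by rw [Int.shiftLeft_eq]; ring]
      rw [band_mask]
      by_cases hb : b ≠ 0
      · rw [hbint, hy, if_pos hb, if_pos hb, ← pvMask_one_eq]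
      · rw [hbint, hy, if_neg hb, if_neg hb, ← pvMask_one_eq, ← pvMask_zero_eq]
    rw [hmask]
    have hA := aLoop_eq k bint L n 0 0 (by omega)
    rw [hA]
    have hB := bTail (k - 1).toNat (pvMask bint n L)
    rw [show (k - 0 - 1).toNat = (k - 1).toNat by omega]
    rw [hB]
    cases kthBit (pvMask bint n L) (k - 1).toNat <;> simp

-- ===== VERDICT (by name: the statement is the Claim_ definition above) =====
theorem bit_index_linear_spec : Claim_equal_bit_index_linear := by
  intro n k b _ hk
  unfold Spec_bit_index_linear
  exact main_eq n k b hk
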